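-- pv_equiv track=rewrite | github.com/s-salarda/MAB_Project | contact_analysis.py | normalize_domain_pairs
-- ===== SOURCE A (Python) =====
-- domain_labels = {
--     "Upper 50kDa Domain": ["215-231", "266-453", "604-621"],
--     "Lower 50kDa Domain": ["472-566","578-590", "645-665"],
--     "S1": ["234-244"],
--     "SH1": ["672-685"],
--     "Purine Loop": ["126-131"],
--     "P Loop": ["179-183"],
--     "N Terminal": ["113-123", "666-671", "170-175", "454-460","244-265"],
--     "Loop 2": ["624-646"],
--     "Loop 3": ["567-577"],
--     "S2": ["462-472"]
-- }
--
-- def normalize_domain_pairs(pair, domain_focus):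
--     """
--     Reorder a contact pair so the domain residue is always first.
--     """
--     a, b = map(int, pair.split('-'))
--     ranges = domain_labels[domain_focus]
--
--     domain_res = set()
--     for r in ranges:
--         low, high = map(int, r.split('-'))
--         domain_res.update(range(low, high + 1))
--
--     if a in domain_res:
--         return f"{a}-{b}"
--     if b in domain_res:
--         return f"{b}-{a}"
--     return f"{a}-{b}"
-- ===== SOURCE B (Python) =====
-- domain_labels = {
--     "Upper 50kDa Domain": ["215-231", "266-453", "604-621"],
--     "Lower 50kDa Domain": ["472-566","578-590", "645-665"],
--     "S1": ["234-244"],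
--     "SH1": ["672-685"],
--     "Purine Loop": ["126-131"],
--     "P Loop": ["179-183"],
--     "N Terminal": ["113-123", "666-671", "170-175", "454-460","244-265"],
--     "Loop 2": ["624-646"],
--     "Loop 3": ["567-577"],
--     "S2": ["462-472"]
-- }
--
-- def normalize_domain_pairs(pair, domain_focus):
--     """
--     Reorder a contact pair so the domain residue is always first.
--     """
--     a, b = map(int, pair.split('-'))
--     bounds = [tuple(map(int, r.split('-'))) for r in domain_labels[domain_focus]]
--     in_a = any(low <= a <= high for low, high in bounds)
--     in_b = any(low <= b <= high for low, high in bounds)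
--     return f"{b}-{a}" if (in_b and not in_a) else f"{a}-{b}"
-- ===== Notes on version B (the rewrite author's own statement) =====
-- stated objective: simpler
-- what changed: B tests interval bounds directly on parsed (low, high) pairs instead of materialising every residue of every range into a set, and replaces the three-way early-return chain by a single swap condition (in_b and not in_a).
import Mathlib
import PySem

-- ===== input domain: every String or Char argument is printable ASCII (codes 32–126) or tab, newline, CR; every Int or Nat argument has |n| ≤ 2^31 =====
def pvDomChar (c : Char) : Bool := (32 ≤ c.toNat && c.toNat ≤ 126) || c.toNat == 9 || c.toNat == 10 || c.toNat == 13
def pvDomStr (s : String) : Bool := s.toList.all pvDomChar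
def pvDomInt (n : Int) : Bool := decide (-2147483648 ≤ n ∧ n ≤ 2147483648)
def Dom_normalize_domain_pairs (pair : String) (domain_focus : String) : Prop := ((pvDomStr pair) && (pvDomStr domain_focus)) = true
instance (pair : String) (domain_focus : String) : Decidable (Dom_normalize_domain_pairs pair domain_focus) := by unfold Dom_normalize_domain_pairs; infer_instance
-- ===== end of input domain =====

-- B replaces A's expansion of every range into a residue set by direct interval-bound tests
-- on parsed (low, high) pairs, and a single swap condition — simpler, no set materialisation.


-- shared module-level constant: the dict literal 'domain_labels' (association list, insertion order)
def domainLabels : PySem.Dict String (List String) :=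
  PySem.Dict.ofList
  [("Upper 50kDa Domain", ["215-231", "266-453", "604-621"]),
   ("Lower 50kDa Domain", ["472-566", "578-590", "645-665"]),
   ("S1", ["234-244"]),
   ("SH1", ["672-685"]),
   ("Purine Loop", ["126-131"]),
   ("P Loop", ["179-183"]),
   ("N Terminal", ["113-123", "666-671", "170-175", "454-460", "244-265"]),
   ("Loop 2", ["624-646"]),
   ("Loop 3", ["567-577"]),
   ("S2", ["462-472"])]

-- 'low, high = map(int, r.split('-'))' — always succeeds on the dict's literal ranges;
-- the defaults are never reached there (and for 'pair' Pre_ guarantees success).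
def parseLH (r : String) : Int × Int :=
  let ps := (PySem.Str.split? r "-").getD []
  (((PySem.Int.ofStr? (List.getD ps 0 "")).getD 0), ((PySem.Int.ofStr? (List.getD ps 1 "")).getD 0))

-- f"{a}-{b}"
def fmtPair (a b : Int) : String := PySem.Str.join "-" [PySem.Int.toStr a, PySem.Int.toStr b]

-- ===== PORT A =====
def normalize_domain_pairs (pair : String) (domain_focus : String) : String :=
  let ab := parseLH pair
  let a := ab.1; let b := ab.2
  let ranges := (PySem.Dict.get? domainLabels domain_focus).getD []
  let domain_res : PySem.Set Int :=
    ranges.foldl (fun s r =>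
      let lh := parseLH r
      PySem.Set.update s (PySem.List.pyRange lh.1 (lh.2 + 1) 1)) PySem.Set.empty
  if PySem.Set.contains domain_res a then fmtPair a b
  else if PySem.Set.contains domain_res b then fmtPair b a
  else fmtPair a b

-- ===== PORT B =====
def normalize_domain_pairs_alt (pair : String) (domain_focus : String) : String :=
  let ab := parseLH pair
  let a := ab.1; let b := ab.2
  let bounds := ((PySem.Dict.get? domainLabels domain_focus).getD []).map parseLH
  let in_a := bounds.any (fun lh => decide (lh.1 ≤ a ∧ a ≤ lh.2))
  let in_b := bounds.any (fun lh => decide (lh.1 ≤ b ∧ b ≤ lh.2))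
  if in_b && !in_a then fmtPair b a else fmtPair a b

-- ===== PRECONDITION & SPEC =====
-- Pre_ excludes exactly the inputs where Python A raises: pair must split on '-' into
-- exactly two int-parsable pieces (else ValueError) and domain_focus must be a key (else KeyError).
def Pre_normalize_domain_pairs (pair : String) (domain_focus : String) : Prop :=
  ((PySem.Str.split? pair "-").getD []).length = 2 ∧
  (PySem.Int.ofStr? (((PySem.Str.split? pair "-").getD []).getD 0 "")).isSome = true ∧
  (PySem.Int.ofStr? (((PySem.Str.split? pair "-").getD []).getD 1 "")).isSome = true ∧
  (PySem.Dict.get? domainLabels domain_focus).isSome = true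
instance (pair : String) (domain_focus : String) : Decidable (Pre_normalize_domain_pairs pair domain_focus) := by unfold Pre_normalize_domain_pairs; infer_instance

def pvWitness_normalize_domain_pairs : String × String := ("234-300", "S1")

def Spec_normalize_domain_pairs (pair : String) (domain_focus : String) (out : String) : Prop := out = normalize_domain_pairs_alt pair domain_focus
instance (pair : String) (domain_focus : String) (out : String) : Decidable (Spec_normalize_domain_pairs pair domain_focus out) := by unfold Spec_normalize_domain_pairs; infer_instance

-- ===== CLAIM (what is proved, stated in full; the proofs are below) =====
def Claim_equal_normalize_domain_pairs : Prop := ∀ (pair : String) (domain_focus : String), Dom_normalize_domain_pairs pair domain_focus → Pre_normalize_domain_pairs pair domain_focus → Spec_normalize_domain_pairs pair domain_focus (normalize_domain_pairs pair domain_focus)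

-- ===== LEMMAS AND PROOFS =====

-- membership in A's accumulated residue set = B's interval test, generalized over the fold's start
theorem mem_fold_update (rs : List String) (s : PySem.Set Int) (x : Int) :
    (x ∈ rs.foldl (fun s r =>
        let lh := parseLH r
        PySem.Set.update s (PySem.List.pyRange lh.1 (lh.2 + 1) 1)) s)
    ↔ x ∈ s ∨ (rs.map parseLH).any (fun lh => decide (lh.1 ≤ x ∧ x ≤ lh.2)) = true := by
  induction rs generalizing s with
  | nil => simp
  | cons r t ih =>
    simp only [List.foldl_cons, List.map_cons, List.any_cons, Bool.or_eq_true,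
      decide_eq_true_eq, ih, PySem.Set.mem_update, PySem.List.mem_pyRange_one]
    constructor
    · rintro (⟨h | h⟩ | h)
      exacts [Or.inl h, Or.inr (Or.inl (by omega)), Or.inr (Or.inr h)]
    · rintro (h | h | h)
      exacts [Or.inl (Or.inl h), Or.inl (Or.inr (by omega)), Or.inr h]

theorem contains_fold_update (rs : List String) (x : Int) :
    PySem.Set.contains (rs.foldl (fun s r =>
        let lh := parseLH r
        PySem.Set.update s (PySem.List.pyRange lh.1 (lh.2 + 1) 1)) PySem.Set.empty) x
    = (rs.map parseLH).any (fun lh => decide (lh.1 ≤ x ∧ x ≤ lh.2)) := by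
  have key : PySem.Set.contains (rs.foldl (fun s r =>
        let lh := parseLH r
        PySem.Set.update s (PySem.List.pyRange lh.1 (lh.2 + 1) 1)) PySem.Set.empty) x = true
      ↔ (rs.map parseLH).any (fun lh => decide (lh.1 ≤ x ∧ x ≤ lh.2)) = true := by
    rw [PySem.Set.contains_iff, mem_fold_update]
    simp [PySem.Set.empty]
  cases hA : PySem.Set.contains (rs.foldl (fun s r =>
        let lh := parseLH r
        PySem.Set.update s (PySem.List.pyRange lh.1 (lh.2 + 1) 1)) PySem.Set.empty) x <;>
    cases hB : (rs.map parseLH).any (fun lh => decide (lh.1 ≤ x ∧ x ≤ lh.2)) <;> simp_all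
  all_goals first
    | (obtain ⟨y, hy, h1, h2⟩ := hB; have := hA y hy h1; omega)
    | (obtain ⟨y, hy, h1, h2⟩ := hA; have := hB y hy h1; omega)

-- ===== VERDICT (by name: the statement is the Claim_ definition above) =====
theorem normalize_domain_pairs_spec : Claim_equal_normalize_domain_pairs := by
  unfold Claim_equal_normalize_domain_pairs
  intro pair domain_focus _ _
  unfold Spec_normalize_domain_pairs normalize_domain_pairs normalize_domain_pairs_alt
  simp only [contains_fold_update]
  cases ha : (((PySem.Dict.get? domainLabels domain_focus).getD []).map parseLH).any
      (fun lh => decide (lh.1 ≤ (parseLH pair).1 ∧ (parseLH pair).1 ≤ lh.2)) <;>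
    cases hb : (((PySem.Dict.get? domainLabels domain_focus).getD []).map parseLH).any
      (fun lh => decide (lh.1 ≤ (parseLH pair).2 ∧ (parseLH pair).2 ≤ lh.2)) <;>
    simp
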